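-- pv_equiv track=rewrite | github.com/likwidoxigen/PythonExercises | AdventOfCode/Day11/seating.py | checkDownLeft2
-- ===== SOURCE A (Python) =====
-- def isOccupied2(arr,x,y):
--     if arr[y][x] == "#":
--         return 1
--     elif arr[y][x] == "L":
--         return 0
--     else:
--         return 5
--
-- def checkDownLeft2(arr,x,y):
--     x = x-1
--     y = y-1
--     if x < 0 or x > len(arr[0])-1 or y > len(arr)-1 or y < 0:
--         return 0
--     else:
--         test =  isOccupied2(arr,x,y)
--         if test == 5:
--             return checkDownLeft2(arr,x,y)
--         else:
--             return test
-- ===== SOURCE B (Python) =====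
-- def isOccupied2(arr,x,y):
--     if arr[y][x] == "#":
--         return 1
--     elif arr[y][x] == "L":
--         return 0
--     else:
--         return 5
--
-- def checkDownLeft2(arr, x, y):
--     x -= 1
--     y -= 1
--     while 0 <= x <= len(arr[0]) - 1 and 0 <= y <= len(arr) - 1:
--         test = isOccupied2(arr, x, y)
--         if test != 5:
--             return test
--         x -= 1
--         y -= 1
--     return 0
-- ===== Notes on version B (the rewrite author's own statement) =====
-- stated objective: idiomatic
-- what changed: Replaced A's tail recursion (re-entering the function after each floor cell) by a single iterative while loop with a pre-decrement, an in-bounds guard and an early return; the isOccupied2 helper is kept.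
-- outside the precondition, e.g. on checkDownLeft2(['ab', '', '#L'], 2, 3): A returns 0, B returns 0
import Mathlib
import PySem

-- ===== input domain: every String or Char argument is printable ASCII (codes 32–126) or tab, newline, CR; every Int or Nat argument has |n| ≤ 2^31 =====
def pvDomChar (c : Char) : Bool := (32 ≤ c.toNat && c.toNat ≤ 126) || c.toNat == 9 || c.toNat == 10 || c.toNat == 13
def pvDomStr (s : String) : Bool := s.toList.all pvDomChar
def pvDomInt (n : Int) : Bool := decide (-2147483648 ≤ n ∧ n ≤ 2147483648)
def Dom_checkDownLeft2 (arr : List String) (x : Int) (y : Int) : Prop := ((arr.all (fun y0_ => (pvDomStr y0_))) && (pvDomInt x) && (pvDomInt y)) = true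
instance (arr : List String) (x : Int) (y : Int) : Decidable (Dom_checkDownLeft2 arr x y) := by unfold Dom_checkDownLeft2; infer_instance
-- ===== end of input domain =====

-- B replaces A's tail recursion by an iterative while loop (pre-decrement, in-bounds guard,
-- early return on a non-floor seat); same helper, same return value — objective: idiomatic.

-- ===== PORT A =====
-- helper shared by both modules' source: returns 1 for '#', 0 for 'L', 5 for anything else;
-- Python raises IndexError when the cell is out of range — PySem gives none there and we
-- return 5 (those inputs are outside Pre_checkDownLeft2).
def isOccupied2 (arr : List String) (x : Int) (y : Int) : Int :=
  match (PySem.List.pyGet? arr y).bind (fun row => PySem.Str.pyGet? row x) with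
  | some c => if c = '#' then 1 else if c = 'L' then 0 else 5
  | none => 5

def checkDownLeft2 (arr : List String) (x : Int) (y : Int) : Int :=
  let x' := x - 1
  let y' := y - 1
  if x' < 0 ∨ x' > (PySem.Str.len ((PySem.List.pyGet? arr 0).getD "") : Int) - 1
      ∨ y' > (arr.length : Int) - 1 ∨ y' < 0 then 0
  else
    let test := isOccupied2 arr x' y'
    if test = 5 then checkDownLeft2 arr x' y' else test
termination_by x.toNat
decreasing_by omega

-- ===== PORT B =====
-- the while loop of Source B, state (x, y)
def checkDownLeft2Loop (arr : List String) (x : Int) (y : Int) : Int :=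
  if 0 ≤ x ∧ x ≤ (PySem.Str.len ((PySem.List.pyGet? arr 0).getD "") : Int) - 1
      ∧ 0 ≤ y ∧ y ≤ (arr.length : Int) - 1 then
    let test := isOccupied2 arr x y
    if test ≠ 5 then test else checkDownLeft2Loop arr (x - 1) (y - 1)
  else 0
termination_by (x + 1).toNat
decreasing_by omega

def checkDownLeft2_alt (arr : List String) (x : Int) (y : Int) : Int :=
  checkDownLeft2Loop arr (x - 1) (y - 1)

-- ===== PRECONDITION & SPEC =====
-- Pre_ excludes inputs where the Python raises IndexError: an empty grid with x ≥ 1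
-- (len(arr[0]) fails), and ragged grids where some row on the scanned down-left diagonal is
-- shorter than row 0 (indexing that row can fail); the latter is conservative — it also
-- excludes some inputs where A stops at a seat before reaching the short row and returns.
def Pre_checkDownLeft2 (arr : List String) (x : Int) (y : Int) : Prop :=
  if arr.isEmpty then x ≤ 0
  else (1 ≤ x ∧ x ≤ (PySem.Str.len (arr.headD "") : Int) ∧ 1 ≤ y ∧ y ≤ (arr.length : Int)) →
    ∀ j : Fin arr.length, y - min x y ≤ (j : Int) → (j : Int) ≤ y - 1 →
      x - y + (j : Int) < (PySem.Str.len (arr.get j) : Int)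
instance (arr : List String) (x : Int) (y : Int) : Decidable (Pre_checkDownLeft2 arr x y) := by
  unfold Pre_checkDownLeft2; infer_instance

def pvWitness_checkDownLeft2 : List String × Int × Int := (["L#", ".#"], 2, 2)

def Spec_checkDownLeft2 (arr : List String) (x : Int) (y : Int) (out : Int) : Prop := out = checkDownLeft2_alt arr x y
instance (arr : List String) (x : Int) (y : Int) (out : Int) : Decidable (Spec_checkDownLeft2 arr x y out) := by unfold Spec_checkDownLeft2; infer_instance

-- ===== CLAIM (what is proved, stated in full; the proofs are below) =====
def Claim_equal_checkDownLeft2 : Prop := ∀ (arr : List String) (x : Int) (y : Int), Dom_checkDownLeft2 arr x y → Pre_checkDownLeft2 arr x y → Spec_checkDownLeft2 arr x y (checkDownLeft2 arr x y)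

-- ===== LEMMAS AND PROOFS =====

-- the two ports agree on every input (the recursion of A is exactly B's loop after the first decrement)
theorem checkDownLeft2_eq_loop (arr : List String) :
    ∀ (n : Nat) (x y : Int), x.toNat = n →
      checkDownLeft2 arr x y = checkDownLeft2Loop arr (x - 1) (y - 1) := by
  intro n
  induction n using Nat.strong_induction_on with
  | _ n ih =>
    intro x y hn
    rw [checkDownLeft2, checkDownLeft2Loop]
    by_cases h : 0 ≤ x - 1 ∧ x - 1 ≤ (PySem.Str.len ((PySem.List.pyGet? arr 0).getD "") : Int) - 1
        ∧ 0 ≤ y - 1 ∧ y - 1 ≤ (arr.length : Int) - 1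
    · rw [if_neg (by omega), if_pos h]
      by_cases ht : isOccupied2 arr (x - 1) (y - 1) = 5
      · have := ih (x - 1).toNat (by omega) (x - 1) (y - 1) rfl
        simp only [ht, this, ne_eq, not_true_eq_false, if_false, if_true]
      · simp only [if_neg ht, if_pos ht]
    · rw [if_pos (by omega), if_neg h]

-- ===== VERDICT (by name: the statement is the Claim_ definition above) =====
theorem checkDownLeft2_spec : Claim_equal_checkDownLeft2 := by
  intro arr x y _ _
  unfold Spec_checkDownLeft2 checkDownLeft2_alt
  exact checkDownLeft2_eq_loop arr x.toNat x y rfl
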